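-- pv_equiv track=rewrite | github.com/nikspatel007/priority-lens | scripts/enrich_emails.py | build_thread_index
-- ===== SOURCE A (Python) =====
-- from collections import Counter, defaultdict
--
-- def build_thread_index(emails: list[dict]) -> dict[str, list[dict]]:
--     """Group emails by thread_id and sort by date."""
--     threads = defaultdict(list)
--     for email in emails:
--         thread_id = email.get('thread_id', '')
--         if thread_id:
--             threads[thread_id].append(email)
--
--     # Sort each thread by date
--     for thread_id in threads:
--         threads[thread_id].sort(
--             key=lambda e: e.get('date', '') or ''
--         )
--
--     return dict(threads)
-- ===== SOURCE B (Python) =====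
-- def build_thread_index(emails: list[dict]) -> dict[str, list[dict]]:
--     """Group emails by thread_id and sort by date (global stable sort, then bucket by filtering)."""
--     tids = [e.get('thread_id', '') for e in emails]
--     order = [t for t in dict.fromkeys(tids) if t]
--     by_date = sorted(emails, key=lambda e: e.get('date', '') or '')
--     return {t: [e for e in by_date if e.get('thread_id', '') == t] for t in order}
-- ===== Notes on version B (the rewrite author's own statement) =====
-- stated objective: alternative
-- what changed: A groups emails into a defaultdict in one pass and then sorts each bucket by date; B instead stably sorts the whole list by date once and then builds each thread's bucket by filtering the sorted list, with key order taken from first appearance.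
import Mathlib
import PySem

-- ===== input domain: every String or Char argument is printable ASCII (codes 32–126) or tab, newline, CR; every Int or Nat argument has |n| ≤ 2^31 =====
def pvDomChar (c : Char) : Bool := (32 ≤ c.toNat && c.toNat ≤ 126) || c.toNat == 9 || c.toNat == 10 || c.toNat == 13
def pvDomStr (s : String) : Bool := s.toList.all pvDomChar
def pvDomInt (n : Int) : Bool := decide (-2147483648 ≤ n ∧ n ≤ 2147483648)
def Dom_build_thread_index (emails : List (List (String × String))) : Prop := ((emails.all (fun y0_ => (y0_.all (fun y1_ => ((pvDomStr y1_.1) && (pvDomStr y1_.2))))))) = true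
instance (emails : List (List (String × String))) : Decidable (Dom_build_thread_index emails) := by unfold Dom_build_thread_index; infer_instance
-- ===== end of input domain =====

-- B stably sorts the whole list by date once and buckets by filtering; A groups first and then sorts each bucket.

-- ===== PORT A =====
-- email.get(k, dflt) on an email modelled as an association list
def pvGetA (e : List (String × String)) (k dflt : String) : String :=
  (PySem.Dict.mk e).getD k dflt

-- lambda e: e.get('date', '') or ''
def pvDateKeyA (e : List (String × String)) : String :=
  let d := pvGetA e "date" ""
  if d ≠ "" then d else ""

def build_thread_index (emails : List (List (String × String))) : List (String × List (List (String × String))) :=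
  -- threads = defaultdict(list); for email in emails: … threads[thread_id].append(email)
  let threads : PySem.Dict String (List (List (String × String))) :=
    emails.foldl (fun d e =>
      let tid := pvGetA e "thread_id" ""
      if tid ≠ "" then d.modify tid [] (fun v => v ++ [e]) else d) PySem.Dict.empty
  -- for thread_id in threads: threads[thread_id].sort(key=…)  (in-place sort of each value)
  let threads2 : PySem.Dict String (List (List (String × String))) :=
    PySem.Dict.mk (threads.items.map (fun kv => (kv.1, PySem.List.sorted kv.2 pvDateKeyA false)))
  -- return dict(threads)
  threads2.items

-- ===== PORT B =====
def pvGetB (e : List (String × String)) (k dflt : String) : String :=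
  (PySem.Dict.mk e).getD k dflt

-- lambda e: e.get('date', '') or ''
def pvDateKeyB (e : List (String × String)) : String :=
  let d := pvGetB e "date" ""
  if d ≠ "" then d else ""

def build_thread_index_alt (emails : List (List (String × String))) : List (String × List (List (String × String))) :=
  -- tids = [e.get('thread_id', '') for e in emails]
  let tids := emails.map (fun e => pvGetB e "thread_id" "")
  -- order = [t for t in dict.fromkeys(tids) if t]
  let order := (PySem.List.dedup tids).filter (fun t => t ≠ "")
  -- by_date = sorted(emails, key=lambda e: e.get('date', '') or '')
  let byDate := PySem.List.sorted emails pvDateKeyB false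
  -- {t: [e for e in by_date if e.get('thread_id', '') == t] for t in order}
  order.map (fun t => (t, byDate.filter (fun e => pvGetB e "thread_id" "" == t)))

-- ===== PRECONDITION & SPEC =====
def Spec_build_thread_index (emails : List (List (String × String))) (out : List (String × List (List (String × String)))) : Prop := out = build_thread_index_alt emails
instance (emails : List (List (String × String))) (out : List (String × List (List (String × String)))) : Decidable (Spec_build_thread_index emails out) := by unfold Spec_build_thread_index; infer_instance

-- ===== CLAIM (what is proved, stated in full; the proofs are below) =====
def Claim_equal_build_thread_index : Prop := ∀ (emails : List (List (String × String))), Dom_build_thread_index emails → Spec_build_thread_index emails (build_thread_index emails)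

-- ===== LEMMAS AND PROOFS =====

-- filtering past an inserted element that fails the predicate
theorem pv_filter_insertBy_neg {α : Type} (p : α → Bool) (before : α → α → Bool) (x : α)
    (acc : List α) (hx : p x = false) :
    (PySem.List.insertBy before x acc).filter p = acc.filter p := by
  induction acc with
  | nil => simp [PySem.List.insertBy, hx]
  | cons y ys ih =>
    simp only [PySem.List.insertBy]
    by_cases h : before x y = true
    · simp [h, List.filter, hx]
    · simp only [if_neg h, List.filter_cons]
      rw [ih]

-- filtering commutes with insertion into a key-sorted list, when the element is kept
theorem pv_filter_insertBy_pos {α κ : Type} [LinearOrder κ] (p : α → Bool) (key : α → κ) (x : α)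
    (acc : List α) (hx : p x = true) (hs : acc.Pairwise (fun a b => key a ≤ key b)) :
    (PySem.List.insertBy (fun a b => decide (key a < key b)) x acc).filter p
      = PySem.List.insertBy (fun a b => decide (key a < key b)) x (acc.filter p) := by
  induction acc with
  | nil => simp [PySem.List.insertBy, List.filter, hx]
  | cons y ys ih =>
    rcases List.pairwise_cons.mp hs with ⟨hy, hys⟩
    by_cases h : key x < key y
    · -- x goes in front; every later element also exceeds key x
      have hl : PySem.List.insertBy (fun a b => decide (key a < key b)) x (y :: ys) = x :: y :: ys := by
        simp [PySem.List.insertBy, h]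
      rw [hl]
      by_cases hpy : p y = true
      · have hfy : (y :: ys).filter p = y :: ys.filter p := by simp [List.filter, hpy]
        rw [List.filter_cons_of_pos hx, hfy]
        have : PySem.List.insertBy (fun a b => decide (key a < key b)) x (y :: ys.filter p) = x :: y :: ys.filter p := by
          simp [PySem.List.insertBy, h]
        rw [this]
      · -- head filtered out: x still goes in front of the filtered tail
        simp only [List.filter_cons_of_pos hx, List.filter_cons_of_neg (by simpa using hpy)]
        cases hf : ys.filter p with
        | nil => simp [PySem.List.insertBy]
        | cons z zs =>
          have hz : z ∈ ys := List.mem_of_mem_filter (hf ▸ List.mem_cons_self)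
          have : decide (key x < key z) = true := by
            simpa using lt_of_lt_of_le h (hy z hz)
          simp [PySem.List.insertBy, this]
    · have hstep : PySem.List.insertBy (fun a b => decide (key a < key b)) x (y :: ys)
          = y :: PySem.List.insertBy (fun a b => decide (key a < key b)) x ys := by
        simp [PySem.List.insertBy, h]
      rw [hstep]
      by_cases hpy : p y = true
      · rw [List.filter_cons_of_pos hpy, ih hys, List.filter_cons_of_pos hpy]
        have : PySem.List.insertBy (fun a b => decide (key a < key b)) x (y :: ys.filter p)
            = y :: PySem.List.insertBy (fun a b => decide (key a < key b)) x (ys.filter p) := by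
          simp [PySem.List.insertBy, h]
        rw [this]
      · rw [List.filter_cons_of_neg (by simpa using hpy), ih hys,
            List.filter_cons_of_neg (by simpa using hpy)]

-- appending one element to the input inserts it into the sorted output
theorem pv_sorted_append_singleton {α κ : Type} [LT κ] [DecidableLT κ] (xs : List α) (x : α) (key : α → κ) :
    PySem.List.sorted (xs ++ [x]) key false
      = PySem.List.insertBy (fun a b => decide (key a < key b)) x (PySem.List.sorted xs key false) := by
  rw [PySem.List.sorted_eq_foldl_insertBy, PySem.List.sorted_eq_foldl_insertBy, List.foldl_append]
  rfl

-- MAIN LEMMA: a stable sort commutes with filtering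
theorem pv_filter_sorted {α κ : Type} [LinearOrder κ] (xs : List α) (p : α → Bool) (key : α → κ) :
    (PySem.List.sorted xs key false).filter p = PySem.List.sorted (xs.filter p) key false := by
  induction xs using List.reverseRecOn with
  | nil => simp [PySem.List.sorted]
  | append_singleton ys x ih =>
    rw [pv_sorted_append_singleton, List.filter_append]
    by_cases hx : p x = true
    · rw [pv_filter_insertBy_pos p key x _ hx (PySem.List.sorted_pairwise ys key),
          ih, List.filter_cons_of_pos hx, List.filter_nil, pv_sorted_append_singleton]
    · rw [pv_filter_insertBy_neg p _ x _ (by simpa using hx), ih,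
          List.filter_cons_of_neg (by simpa using hx), List.filter_nil, List.append_nil]

-- ordered dedup commutes with a filter whose predicate depends only on the element
theorem pv_filter_ofList (xs : List String) :
    (PySem.Set.ofList xs).filter (fun t => t ≠ "") = PySem.Set.ofList (xs.filter (fun t => t ≠ "")) := by
  induction xs using List.reverseRecOn with
  | nil => rfl
  | append_singleton ys y ih =>
    have h2 : PySem.Set.ofList (ys ++ [y]) = PySem.Set.add (PySem.Set.ofList ys) y := by
      simp [PySem.Set.ofList, List.foldl_append]
    by_cases hy : y = ""
    · subst hy
      have hfe : List.filter (fun t => decide (t ≠ "")) [""] = ([] : List String) := by decide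
      rw [List.filter_append, h2, hfe, List.append_nil, PySem.Set.add]
      by_cases hmem : PySem.Set.contains (PySem.Set.ofList ys) "" = true
      · rw [if_pos hmem]; exact ih
      · rw [if_neg hmem, List.filter_append, hfe, List.append_nil]; exact ih
    · have hfy : List.filter (fun t => decide (t ≠ "")) [y] = [y] := by
        simp [hy]
      have h3 : PySem.Set.ofList (ys.filter (fun t => decide (t ≠ "")) ++ [y])
          = PySem.Set.add (PySem.Set.ofList (ys.filter (fun t => decide (t ≠ "")))) y := by
        simp [PySem.Set.ofList, List.foldl_append]
      rw [List.filter_append, hfy, h2, h3, ← ih]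
      simp only [PySem.Set.add]
      by_cases hmem : PySem.Set.contains (PySem.Set.ofList ys) y = true
      · have hc : PySem.Set.contains (List.filter (fun t => decide (t ≠ "")) (PySem.Set.ofList ys)) y = true := by
          simp only [PySem.Set.contains, List.contains_eq_mem, decide_eq_true_iff]
          exact List.mem_filter.mpr ⟨by simpa [PySem.Set.contains, List.contains_eq_mem] using hmem, by simpa using hy⟩
        rw [if_pos hmem, if_pos hc]
      · have hc : ¬ PySem.Set.contains (List.filter (fun t => decide (t ≠ "")) (PySem.Set.ofList ys)) y = true := by
          simp only [PySem.Set.contains, List.contains_eq_mem, decide_eq_true_iff]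
          intro h
          exact absurd (List.mem_filter.mp h).1 (by simpa [PySem.Set.contains, List.contains_eq_mem] using hmem)
        rw [if_neg hmem, if_neg hc, List.filter_append, hfy]

-- ===== VERDICT (by name: the statement is the Claim_ definition above) =====
theorem build_thread_index_spec : Claim_equal_build_thread_index := by
  intro emails _
  unfold Spec_build_thread_index build_thread_index build_thread_index_alt
  have hget : pvGetB = pvGetA := rfl
  have hdate : pvDateKeyB = pvDateKeyA := rfl
  rw [hget, hdate]
  set tid := fun e : List (String × String) => pvGetA e "thread_id" "" with htid
  -- rewrite A's grouping loop as a fold over the kept emails, keyed pairs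
  have hloop :
      emails.foldl (fun d e => if tid e ≠ "" then d.modify (tid e) [] (fun v => v ++ [e]) else d)
        (PySem.Dict.empty : PySem.Dict String (List (List (String × String))))
      = ((emails.filter (fun e => decide (tid e ≠ ""))).map (fun e => (tid e, e))).foldl
          (fun d p => d.modify p.1 [] (fun v => v ++ [p.2])) PySem.Dict.empty := by
    rw [List.foldl_map]
    exact PySem.List.foldl_ite_eq_foldl_filter (fun e => tid e ≠ "")
      (fun (d : PySem.Dict String (List (List (String × String)))) e =>
        d.modify (tid e) [] (fun v => v ++ [e])) emails PySem.Dict.empty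
  set l' := emails.filter (fun e => decide (tid e ≠ "")) with hl'
  set pairs := l'.map (fun e => (tid e, e)) with hpairs
  set threads := pairs.foldl (fun d p => d.modify p.1 [] (fun v => v ++ [p.2]))
      (PySem.Dict.empty : PySem.Dict String (List (List (String × String)))) with hthreads
  rw [hloop]
  -- keys of the grouping dict, nodup
  have hkeysmap : pairs.map Prod.fst = l'.map tid := by
    simp [hpairs, List.map_map, Function.comp]
  have hkeys : threads.keys = PySem.Set.ofList (l'.map tid) := by
    have := PySem.Dict.keys_foldl_modify_key pairs (Prod.fst) ([] : List (List (String × String)))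
      (fun _ p => fun v => v ++ [p.2]) PySem.Dict.empty
    simp only [hthreads]
    rw [this, PySem.Dict.keys_empty, hkeysmap]
    rfl
  have hnodup : threads.keys.Nodup := by
    rw [hkeys]; exact PySem.Set.nodup_ofList _
  -- each bucket is a filter of l'
  have hbucket : ∀ c, threads.getD c [] = l'.filter (fun e => tid e == c) := by
    intro c
    rw [hthreads, PySem.Dict.getD_foldl_modify_append pairs PySem.Dict.empty c,
        PySem.Dict.getD_empty]
    simp only [hpairs, List.filter_map, List.map_map]
    simp [Function.comp_def]
  -- items of the grouped dict
  have hitems : threads.items = (PySem.Set.ofList (l'.map tid)).map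
      (fun k => (k, l'.filter (fun e => tid e == k))) := by
    rw [PySem.Dict.items_eq_map_keys threads hnodup []]
    rw [hkeys]
    exact List.map_congr_left (fun k _ => by rw [hbucket k])
  -- both sides index their buckets by the same key list
  have horder : (PySem.List.dedup (emails.map tid)).filter (fun t => t ≠ "")
      = PySem.Set.ofList (l'.map tid) := by
    have h1 : l'.map tid = (emails.map tid).filter (fun t => t ≠ "") := by
      rw [hl', List.filter_map]
      rfl
    rw [h1, PySem.List.dedup, pv_filter_ofList]
  simp only [hitems, List.map_map, horder]
  apply List.map_congr_left
  intro k hk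
  have hkne : k ≠ "" := by
    have : k ∈ l'.map tid := by
      simpa [pysem] using hk
    rcases List.mem_map.mp this with ⟨e, he, rfl⟩
    have := List.of_mem_filter he
    simpa using this
  have hflt : l'.filter (fun e => tid e == k) = emails.filter (fun e => tid e == k) := by
    rw [hl', List.filter_filter]
    apply List.filter_congr
    intro e _
    by_cases h : tid e = k
    · simp [h, hkne]
    · simp [h]
  simp only [Function.comp_def]
  rw [pv_filter_sorted emails (fun e => tid e == k) pvDateKeyA, ← hflt]
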